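-- pv_equiv track=rewrite | github.com/willyc2004/navigating_uncertainty_in_mpp | main_test_torchrl.py | early_stopping
-- ===== SOURCE A (Python) =====
-- def early_stopping(val_rewards, patience=2):
--     """
--     Check for early stopping based on consecutive decreases in validation rewards.
--
--     Args:
--         val_rewards (list): A list of validation rewards.
--         patience (int): Number of consecutive decreases allowed before triggering early stopping.
--
--     Returns:
--         bool: True if early stopping condition is met, otherwise False.
--     """
--     # Track the number of consecutive decreases
--     decrease_count = 0
--
--     for i in range(1, len(val_rewards)):
--         if val_rewards[i] < val_rewards[i - 1]:
--             decrease_count += 1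
--             if decrease_count >= patience:
--                 return True
--         else:
--             decrease_count = 0  # Reset if the reward improves or stays the same
--
--     return False
-- ===== SOURCE B (Python) =====
-- def early_stopping(val_rewards, patience=2):
--     # Materialise the pairwise-decrease sequence, then scan it run by run with
--     # two pointers: early stopping triggers iff some maximal run of consecutive
--     # decreases has length >= patience.
--     decreases = [cur < prev for prev, cur in zip(val_rewards, val_rewards[1:])]
--     i, n = 0, len(decreases)
--     while i < n:
--         b = decreases[i]
--         j = i + 1
--         while j < n and decreases[j] == b:
--             j += 1
--         if b and j - i >= patience:
--             return True
--         i = j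
--     return False
-- ===== Notes on version B (the rewrite author's own statement) =====
-- stated objective: alternative
-- what changed: Replaces the imperative reset counter over indices by materialising the pairwise-decrease boolean sequence once and scanning it run by run with two pointers, returning True iff some maximal run of decreases has length >= patience.
import Mathlib
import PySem

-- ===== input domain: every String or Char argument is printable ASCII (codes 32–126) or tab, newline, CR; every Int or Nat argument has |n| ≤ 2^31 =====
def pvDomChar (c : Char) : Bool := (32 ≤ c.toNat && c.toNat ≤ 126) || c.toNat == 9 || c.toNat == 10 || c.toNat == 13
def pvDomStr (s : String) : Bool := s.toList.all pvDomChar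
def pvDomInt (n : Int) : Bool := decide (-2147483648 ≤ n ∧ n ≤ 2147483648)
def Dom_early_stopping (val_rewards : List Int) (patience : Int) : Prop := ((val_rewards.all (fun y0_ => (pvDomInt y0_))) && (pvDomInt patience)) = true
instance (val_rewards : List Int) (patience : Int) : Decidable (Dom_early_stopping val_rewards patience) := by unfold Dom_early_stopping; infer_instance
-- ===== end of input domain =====

-- B replaces A's imperative reset counter by materialising the pairwise-decrease
-- sequence once and scanning it run by run (alternative decomposition, same O(n) cost).

-- ===== PORT A =====
-- A's 'for i in range(1, len(val_rewards))' loop with early return, as index recursion.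
-- Both indices i and i - 1 are always in range there, so getD is exact.
def early_stopping_go (xs : List Int) (patience : Int) (i : Nat) (cnt : Int) : Bool :=
  if i < xs.length then
    if xs.getD i 0 < xs.getD (i - 1) 0 then
      if patience ≤ cnt + 1 then true
      else early_stopping_go xs patience (i + 1) (cnt + 1)
    else early_stopping_go xs patience (i + 1) 0
  else false
termination_by xs.length - i

def early_stopping (val_rewards : List Int) (patience : Int) : Bool :=
  early_stopping_go val_rewards patience 1 0

-- ===== PORT B =====
-- decreases = [cur < prev for prev, cur in zip(val_rewards, val_rewards[1:])]
def pyDecreases (xs : List Int) : List Bool :=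
  List.zipWith (fun prev cur => decide (cur < prev)) xs xs.tail

-- B's outer while loop, written over the remaining suffix decreases[i:]: b is its
-- head, the inner while loop advancing j over entries equal to b is the takeWhile
-- (run length j - i = 1 + its length), and moving i to j is the dropWhile.
def runScan (patience : Int) (ds : List Bool) : Bool :=
  match ds with
  | [] => false
  | b :: rest =>
    if b && decide (patience ≤ 1 + ((rest.takeWhile (· == b)).length : Int)) then true
    else runScan patience (rest.dropWhile (· == b))
termination_by ds.length
decreasing_by
  have := List.length_dropWhile_le (· == b) rest
  simp only [List.length_cons]
  omega

def early_stopping_alt (val_rewards : List Int) (patience : Int) : Bool :=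
  runScan patience (pyDecreases val_rewards)

-- ===== PRECONDITION & SPEC =====
def Spec_early_stopping (val_rewards : List Int) (patience : Int) (out : Bool) : Prop := out = early_stopping_alt val_rewards patience
instance (val_rewards : List Int) (patience : Int) (out : Bool) : Decidable (Spec_early_stopping val_rewards patience out) := by unfold Spec_early_stopping; infer_instance

-- ===== CLAIM (what is proved, stated in full; the proofs are below) =====
def Claim_equal_early_stopping : Prop := ∀ (val_rewards : List Int) (patience : Int), Dom_early_stopping val_rewards patience → Spec_early_stopping val_rewards patience (early_stopping val_rewards patience)

-- ===== LEMMAS AND PROOFS =====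

-- A's loop body, re-expressed as a scan over the boolean decrease sequence.
def countScan (p : Int) : List Bool → Int → Bool
  | [], _ => false
  | d :: rest, cnt =>
    if d then (if p ≤ cnt + 1 then true else countScan p rest (cnt + 1))
    else countScan p rest 0

lemma length_pyDecreases (xs : List Int) : (pyDecreases xs).length = xs.length - 1 := by
  simp [pyDecreases]

lemma getElem_pyDecreases (xs : List Int) (j : Nat) (h : j < (pyDecreases xs).length) :
    (pyDecreases xs)[j] =
      decide (xs[j + 1]'(by simp [length_pyDecreases] at h; omega) <
              xs[j]'(by simp [length_pyDecreases] at h; omega)) := by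
  simp [pyDecreases, List.getElem_zipWith, List.getElem_tail]

lemma go_eq_countScan (xs : List Int) (p : Int) :
    ∀ n i cnt, xs.length - i = n → 1 ≤ i →
      early_stopping_go xs p i cnt = countScan p ((pyDecreases xs).drop (i - 1)) cnt := by
  intro n
  induction n with
  | zero =>
    intro i cnt hn hi
    rw [early_stopping_go, if_neg (by omega),
      List.drop_of_length_le (by rw [length_pyDecreases]; omega)]
    rfl
  | succ n ih =>
    intro i cnt hn hi
    have hilt : i < xs.length := by omega
    have hj : i - 1 < (pyDecreases xs).length := by rw [length_pyDecreases]; omega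
    have h1 : i - 1 + 1 = i := by omega
    have hdrop : (pyDecreases xs).drop (i - 1) =
        (pyDecreases xs)[i - 1] :: (pyDecreases xs).drop i := by
      rw [List.drop_eq_getElem_cons hj, h1]
    have hget : (pyDecreases xs)[i - 1] = decide (xs.getD i 0 < xs.getD (i - 1) 0) := by
      rw [getElem_pyDecreases]
      simp only [h1]
      rw [List.getD_eq_getElem _ _ hilt,
        List.getD_eq_getElem _ _ (show i - 1 < xs.length by omega)]
    rw [early_stopping_go, if_pos hilt, hdrop, hget, countScan]
    by_cases hlt : xs.getD i 0 < xs.getD (i - 1) 0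
    · simp only [hlt, decide_true, if_true]
      by_cases hp : p ≤ cnt + 1
      · rw [if_pos hp, if_pos hp]
      · rw [if_neg hp, if_neg hp, ih (i + 1) (cnt + 1) (by omega) (by omega),
          Nat.add_sub_cancel]
    · simp only [hlt, decide_false, Bool.false_eq_true, if_false]
      rw [ih (i + 1) 0 (by omega) (by omega), Nat.add_sub_cancel]

lemma runScan_nil (p : Int) : runScan p [] = false := by rw [runScan]

lemma runScan_cons (p : Int) (b : Bool) (rest : List Bool) :
    runScan p (b :: rest) =
      if b && decide (p ≤ 1 + ((rest.takeWhile (· == b)).length : Int)) then true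
      else runScan p (rest.dropWhile (· == b)) := by
  rw [runScan]

lemma runScan_cons_true (p : Int) (rest : List Bool) :
    runScan p (true :: rest) =
      if p ≤ 1 + ((rest.takeWhile (· == true)).length : Int) then true
      else runScan p (rest.dropWhile (· == true)) := by
  rw [runScan_cons]; simp

lemma runScan_cons_false (p : Int) (rest : List Bool) :
    runScan p (false :: rest) = runScan p (rest.dropWhile (· == false)) := by
  rw [runScan_cons]; simp

lemma countScan_eq (p : Int) :
    ∀ (ds : List Bool) (cnt : Int), 0 ≤ cnt →
      countScan p ds cnt =
        (if ds.takeWhile (· == true) ≠ [] ∧ p ≤ cnt + ((ds.takeWhile (· == true)).length : Int) then true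
         else runScan p ds) := by
  intro ds
  induction ds with
  | nil => intro cnt _; simp [countScan, runScan_nil]
  | cons b rest ih =>
    intro cnt hcnt
    cases b with
    | true =>
      rw [countScan, if_pos rfl, runScan_cons_true]
      simp only [List.takeWhile_cons, beq_self_eq_true, if_true, List.length_cons, ne_eq,
        reduceCtorEq, not_false_eq_true, true_and]
      by_cases hp : p ≤ cnt + 1
      · rw [if_pos hp, if_pos (by push_cast; omega)]
      · rw [if_neg hp, ih (cnt + 1) (by omega)]
        cases rest with
        | nil =>
          simp only [List.takeWhile_nil, List.length_nil, ne_eq, not_true_eq_false,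
            false_and, if_false, runScan_nil, List.dropWhile_nil]
          rw [if_neg (by push_cast; omega), if_neg (by push_cast; omega)]
        | cons r rs =>
          cases r with
          | false =>
            simp only [List.takeWhile_cons, List.dropWhile_cons, show (false == true) = false
              from rfl, Bool.false_eq_true, if_false, List.length_nil, ne_eq,
              not_true_eq_false, false_and]
            rw [if_neg (by push_cast; omega), if_neg (by push_cast; omega)]
          | true =>
            simp only [List.takeWhile_cons, List.dropWhile_cons, beq_self_eq_true, if_true,
              List.length_cons, ne_eq, reduceCtorEq, not_false_eq_true, true_and]
            by_cases hc : p ≤ cnt + 1 + (((rs.takeWhile (· == true)).length : Int) + 1)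
            · rw [if_pos (by push_cast at hc ⊢; omega), if_pos (by push_cast at hc ⊢; omega)]
            · rw [if_neg (by push_cast at hc ⊢; omega), if_neg (by push_cast at hc ⊢; omega),
                runScan_cons_true, if_neg (by omega),
                if_neg (by push_cast; omega)]
    | false =>
      rw [countScan, if_neg (by simp), ih 0 le_rfl, runScan_cons_false]
      simp only [List.takeWhile_cons, show (false == true) = false from rfl,
        Bool.false_eq_true, if_false, ne_eq, not_true_eq_false, false_and, if_false]
      cases rest with
      | nil => simp [runScan_nil]
      | cons r rs =>
        cases r with
        | true =>
          simp only [List.takeWhile_cons, List.dropWhile_cons, beq_self_eq_true, if_true,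
            show (true == false) = false from rfl, Bool.false_eq_true, if_false,
            List.length_cons, reduceCtorEq, not_false_eq_true, true_and]
          rw [runScan_cons_true]
          split_ifs with h1 h2 h2
          · rfl
          · exact absurd (by push_cast at h1 ⊢; omega) h2
          · exact absurd (by push_cast at h2 ⊢; omega) h1
          · rfl
        | false =>
          simp only [List.takeWhile_cons, List.dropWhile_cons,
            show (false == false) = true from rfl, if_true,
            show (false == true) = false from rfl, Bool.false_eq_true, if_false,
            List.length_nil, not_true_eq_false, false_and,
            runScan_cons_false]

lemma countScan_zero (p : Int) (ds : List Bool) : countScan p ds 0 = runScan p ds := by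
  rw [countScan_eq p ds 0 le_rfl]
  cases ds with
  | nil => simp
  | cons b rest =>
    cases b with
    | true =>
      rw [runScan_cons_true]
      simp only [List.takeWhile_cons, beq_self_eq_true, if_true, ne_eq, reduceCtorEq,
        not_false_eq_true, true_and, List.length_cons]
      split_ifs with h1 h2 h2
      · rfl
      · exact absurd (by push_cast at h1 ⊢; omega) h2
      · exact absurd (by push_cast at h2 ⊢; omega) h1
      · rfl
    | false =>
      simp

-- ===== VERDICT (by name: the statement is the Claim_ definition above) =====
theorem early_stopping_spec : Claim_equal_early_stopping := by
  intro xs p _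
  unfold Spec_early_stopping early_stopping early_stopping_alt
  rw [go_eq_countScan xs p (xs.length - 1) 1 0 rfl le_rfl]
  simp [countScan_zero]
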